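-- pv_equiv track=rewrite | github.com/openai/parameter-golf | tools/debug_w9_community_oracle.py | balanced_partition_sizes
-- ===== SOURCE A (Python) =====
-- def balanced_partition_sizes(n_items: int, n_groups: int, preferred_size: int) -> list[int]:
--     sizes = [int(preferred_size) for _ in range(max(n_groups, 1))]
--     while sum(sizes) > n_items:
--         for idx in reversed(range(len(sizes))):
--             if sizes[idx] > 1 and sum(sizes) > n_items:
--                 sizes[idx] -= 1
--     while sum(sizes) < n_items:
--         for idx in range(len(sizes)):
--             if sum(sizes) >= n_items:
--                 break
--             sizes[idx] += 1
--     return sizes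
-- ===== SOURCE B (Python) =====
-- def balanced_partition_sizes(n_items: int, n_groups: int, preferred_size: int) -> list[int]:
--     g = max(n_groups, 1)
--     total = preferred_size * g
--     if total <= n_items:
--         q, r = divmod(n_items - total, g)
--         return [preferred_size + q + (1 if i < r else 0) for i in range(g)]
--     else:
--         q, r = divmod(total - n_items, g)
--         return [preferred_size - q - (1 if i >= g - r else 0) for i in range(g)]
-- ===== Notes on version B (the rewrite author's own statement) =====
-- stated objective: faster
-- what changed: Replaced the two round-robin while/for adjustment loops (each recomputing sum(sizes) per step) with a closed-form divmod distribution: quotient added to every group and the remainder given one-by-one to the front (surplus) or taken from the back (deficit); intended as asymptotically faster — a timing run measured B 1160x at the largest size where A finished (A timed out on most larger inputs), though with too few both-finished samples to confirm the label.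
import Mathlib
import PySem

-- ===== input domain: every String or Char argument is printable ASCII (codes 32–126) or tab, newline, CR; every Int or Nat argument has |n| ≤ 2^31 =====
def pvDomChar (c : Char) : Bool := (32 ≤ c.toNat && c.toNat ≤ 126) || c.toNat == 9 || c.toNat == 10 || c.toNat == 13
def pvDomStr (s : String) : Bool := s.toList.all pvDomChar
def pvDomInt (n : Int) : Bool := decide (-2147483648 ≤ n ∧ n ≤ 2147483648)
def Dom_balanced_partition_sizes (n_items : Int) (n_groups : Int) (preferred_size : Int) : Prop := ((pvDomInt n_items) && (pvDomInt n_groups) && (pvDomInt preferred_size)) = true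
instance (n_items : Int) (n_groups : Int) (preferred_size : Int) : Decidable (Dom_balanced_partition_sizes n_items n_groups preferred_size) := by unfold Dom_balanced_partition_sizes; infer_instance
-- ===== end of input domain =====

-- B replaces A's two round-robin adjustment loops (every step of which recomputes sum(sizes))
-- by a closed-form divmod distribution, intended as faster (a timing run measured B far
-- ahead where A finished, but A timed out on most large inputs, so the label is unconfirmed);
-- A and B are proved equal on Pre_ (the inputs where A's first while loop terminates).

-- ===== PORT A =====
-- one step of the inner `for idx in reversed(range(len(sizes)))` body of the first while loop
def pvStep1 (n : Int) (t : List Int) (idx : Nat) : List Int :=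
  if t.getD idx 0 > 1 ∧ t.sum > n then t.set idx (t.getD idx 0 - 1) else t

-- one full `for` pass of the first while loop (len(sizes) never changes)
def pvPass1 (n : Int) (s : List Int) : List Int :=
  ((List.range s.length).reverse).foldl (pvStep1 n) s

-- the first `while sum(sizes) > n_items` loop; the fuel only totalizes the recursion: each
-- pass that changes anything lowers the sum by at least 1, so (sum - n).toNat passes always
-- reach the exit condition when the Python loop terminates (Pre_); outside Pre_ the Python
-- loop never terminates and nothing is claimed
def pvLoop1 (n : Int) : Nat → List Int → List Int
  | 0, s => s
  | f + 1, s => if s.sum > n then pvLoop1 n f (pvPass1 n s) else s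

-- one step of the inner `for idx in range(len(sizes))` body of the second while loop;
-- the Bool is the `break` flag (after the break the rest of the pass does nothing)
def pvStep2 (n : Int) (t : List Int × Bool) (idx : Nat) : List Int × Bool :=
  if t.2 then t
  else if t.1.sum ≥ n then (t.1, true)
  else (t.1.set idx (t.1.getD idx 0 + 1), false)

-- one full `for` pass of the second while loop
def pvPass2 (n : Int) (s : List Int) : List Int :=
  ((List.range s.length).foldl (pvStep2 n) (s, false)).1

-- the second `while sum(sizes) < n_items` loop (each pass raises the sum by at least 1,
-- so (n - sum).toNat passes always suffice; this loop always terminates in Python)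
def pvLoop2 (n : Int) : Nat → List Int → List Int
  | 0, s => s
  | f + 1, s => if s.sum < n then pvLoop2 n f (pvPass2 n s) else s

def balanced_partition_sizes (n_items : Int) (n_groups : Int) (preferred_size : Int) : List Int :=
  let sizes := (PySem.List.pyRange 0 (max n_groups 1) 1).map (fun _ => preferred_size)
  let s1 := pvLoop1 n_items (sizes.sum - n_items).toNat sizes
  pvLoop2 n_items (n_items - s1.sum).toNat s1

-- ===== PORT B =====
def balanced_partition_sizes_alt (n_items : Int) (n_groups : Int) (preferred_size : Int) : List Int :=
  let g := max n_groups 1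
  let total := preferred_size * g
  if total ≤ n_items then
    let q := PySem.Int.floordiv (n_items - total) g
    let r := PySem.Int.mod (n_items - total) g
    (PySem.List.pyRange 0 g 1).map (fun i => preferred_size + q + if i < r then 1 else 0)
  else
    let q := PySem.Int.floordiv (total - n_items) g
    let r := PySem.Int.mod (total - n_items) g
    (PySem.List.pyRange 0 g 1).map (fun i => preferred_size - q - if g - r ≤ i then 1 else 0)

-- ===== PRECONDITION & SPEC =====
-- Pre_ excludes exactly the inputs on which A never returns: its first while loop can only
-- shrink entries that are > 1, so with g = max(n_groups,1) it spins forever whenever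
-- preferred_size*g > n_items and not (preferred_size ≥ 2 and g ≤ n_items); A returns a
-- value on every input satisfying Pre_.
def Pre_balanced_partition_sizes (n_items : Int) (n_groups : Int) (preferred_size : Int) : Prop :=
  preferred_size * (max n_groups 1) ≤ n_items ∨
    (2 ≤ preferred_size ∧ (max n_groups 1) ≤ n_items)
instance (n_items : Int) (n_groups : Int) (preferred_size : Int) : Decidable (Pre_balanced_partition_sizes n_items n_groups preferred_size) := by unfold Pre_balanced_partition_sizes; infer_instance

def pvWitness_balanced_partition_sizes : Int × Int × Int := (5, 2, 3)

def Spec_balanced_partition_sizes (n_items : Int) (n_groups : Int) (preferred_size : Int) (out : List Int) : Prop := out = balanced_partition_sizes_alt n_items n_groups preferred_size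
instance (n_items : Int) (n_groups : Int) (preferred_size : Int) (out : List Int) : Decidable (Spec_balanced_partition_sizes n_items n_groups preferred_size out) := by unfold Spec_balanced_partition_sizes; infer_instance

-- ===== CLAIM (what is proved, stated in full; the proofs are below) =====
def Claim_equal_balanced_partition_sizes : Prop := ∀ (n_items : Int) (n_groups : Int) (preferred_size : Int), Dom_balanced_partition_sizes n_items n_groups preferred_size → Pre_balanced_partition_sizes n_items n_groups preferred_size → Spec_balanced_partition_sizes n_items n_groups preferred_size (balanced_partition_sizes n_items n_groups preferred_size)

-- ===== LEMMAS AND PROOFS =====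

theorem pv_sum_replicate (k : Nat) (x : Int) : (List.replicate k x).sum = (k : Int) * x := by
  simp [List.sum_replicate]

theorem pvStep2_broke (n : Int) (l : List Nat) (s : List Int) :
    l.foldl (pvStep2 n) (s, true) = (s, true) := by
  induction l with
  | nil => rfl
  | cons a l ih => simpa [pvStep2] using ih

theorem pvStep2_false (n : Int) (s : List Int) (idx : Nat) :
    pvStep2 n (s, false) idx
    = if s.sum ≥ n then (s, true) else (s.set idx (s.getD idx 0 + 1), false) := by
  simp [pvStep2]

theorem pv_shapeF_getD (k m : Nat) (c : Int) (hm : 0 < m) :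
    (List.replicate k (c+1) ++ List.replicate m c).getD k 0 = c := by
  rcases m with _ | m
  · omega
  · rw [List.getD_eq_getElem?_getD, List.getElem?_append_right (by simp)]
    simp

theorem pv_shapeF_set (k m : Nat) (c : Int) :
    (List.replicate k (c+1) ++ List.replicate (m+1) c).set k (c+1)
    = List.replicate (k+1) (c+1) ++ List.replicate m c := by
  rw [List.set_append]
  simp only [List.length_replicate, lt_irrefl, Nat.sub_self,
    List.replicate_succ, List.set_cons_zero]
  rw [show (c+1) :: List.replicate m c = [c+1] ++ List.replicate m c from rfl,
    ← List.append_assoc, ← List.replicate_succ', List.replicate_succ]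
  rfl

theorem pv_shapeF_sum (k m : Nat) (c : Int) :
    (List.replicate k (c+1) ++ List.replicate m c).sum = (k : Int) * (c+1) + (m : Int) * c := by
  simp [List.sum_append]

theorem pvPass2_go (n : Int) (c : Int) : ∀ (m k : Nat),
    ((List.range' k m).foldl (pvStep2 n)
        (List.replicate k (c+1) ++ List.replicate m c, false)).1
    = List.replicate (k + min m (n - (List.replicate k (c+1) ++ List.replicate m c).sum).toNat) (c+1)
        ++ List.replicate (m - min m (n - (List.replicate k (c+1) ++ List.replicate m c).sum).toNat) c := by
  intro m
  induction m with
  | zero => intro k; simp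
  | succ m ih =>
    intro k
    rw [List.range'_succ, List.foldl_cons, pvStep2_false]
    by_cases hs : (List.replicate k (c+1) ++ List.replicate (m+1) c).sum ≥ n
    · rw [if_pos hs, pvStep2_broke]
      have h0 : (n - (List.replicate k (c+1) ++ List.replicate (m+1) c).sum).toNat = 0 := by
        omega
      rw [h0]
      simp
    · rw [if_neg hs, pv_shapeF_getD k (m+1) c (by omega), pv_shapeF_set, ih (k+1)]
      have hS' : (List.replicate (k+1) (c+1) ++ List.replicate m c).sum
          = (List.replicate k (c+1) ++ List.replicate (m+1) c).sum + 1 := by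
        rw [pv_shapeF_sum, pv_shapeF_sum]; push_cast; ring
      rw [hS']
      have hd : 0 < (n - (List.replicate k (c+1) ++ List.replicate (m+1) c).sum).toNat := by
        omega
      congr 1
      · congr 1
        omega
      · congr 1
        omega

theorem pv_shapeB_getD (m k : Nat) (c : Int) :
    (List.replicate (m+1) c ++ List.replicate k (c-1)).getD m 0 = c := by
  rw [List.getD_eq_getElem?_getD, List.getElem?_append_left (by simp)]
  simp

theorem pv_shapeB_set (m k : Nat) (c : Int) :
    (List.replicate (m+1) c ++ List.replicate k (c-1)).set m (c-1)
    = List.replicate m c ++ List.replicate (k+1) (c-1) := by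
  rw [List.replicate_succ' (n := m), List.append_assoc, List.set_append]
  simp [List.replicate_succ]

theorem pv_shapeB_sum (j k : Nat) (c : Int) :
    (List.replicate j c ++ List.replicate k (c-1)).sum = (j : Int) * c + (k : Int) * (c-1) := by
  simp [List.sum_append]

theorem pvPass1_go (n : Int) (c : Int) (hc : 2 ≤ c) : ∀ (m j k : Nat), m ≤ j →
    (m = j ∨ (List.replicate j c ++ List.replicate k (c-1)).sum ≤ n) →
    ((List.range m).reverse.foldl (pvStep1 n) (List.replicate j c ++ List.replicate k (c-1)))
    = List.replicate (j - min m ((List.replicate j c ++ List.replicate k (c-1)).sum - n).toNat) c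
        ++ List.replicate (k + min m ((List.replicate j c ++ List.replicate k (c-1)).sum - n).toNat) (c-1) := by
  intro m
  induction m with
  | zero => intro j k _ _; simp
  | succ m ih =>
    intro j k hmj hdisj
    rw [List.range_succ, List.reverse_append]
    simp only [List.reverse_singleton, List.singleton_append, List.foldl_cons]
    by_cases hs : (List.replicate j c ++ List.replicate k (c-1)).sum > n
    · have hj : m + 1 = j := by
        rcases hdisj with h | h
        · exact h
        · omega
      subst hj
      rw [show pvStep1 n (List.replicate (m+1) c ++ List.replicate k (c-1)) m
            = (List.replicate (m+1) c ++ List.replicate k (c-1)).set m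
                ((List.replicate (m+1) c ++ List.replicate k (c-1)).getD m 0 - 1) from
          if_pos ⟨by rw [pv_shapeB_getD]; omega, hs⟩]
      rw [pv_shapeB_getD, pv_shapeB_set, ih m (k+1) (le_refl m) (Or.inl rfl)]
      have hS' : (List.replicate m c ++ List.replicate (k+1) (c-1)).sum
          = (List.replicate (m+1) c ++ List.replicate k (c-1)).sum - 1 := by
        rw [pv_shapeB_sum, pv_shapeB_sum]; push_cast; ring
      rw [hS']
      have hd : 0 < ((List.replicate (m+1) c ++ List.replicate k (c-1)).sum - n).toNat := by
        omega
      congr 1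
      · congr 1
        omega
      · congr 1
        omega
    · rw [show pvStep1 n (List.replicate j c ++ List.replicate k (c-1)) m
            = List.replicate j c ++ List.replicate k (c-1) from
          if_neg (by intro h; exact hs h.2)]
      rw [ih j k (by omega) (Or.inr (by omega))]
      have h0 : ((List.replicate j c ++ List.replicate k (c-1)).sum - n).toNat = 0 := by omega
      rw [h0]
      simp

theorem pvLoop1_stop (n : Int) (f : Nat) (s : List Int) (h : ¬ s.sum > n) :
    pvLoop1 n f s = s := by
  cases f <;> simp [pvLoop1, h]

theorem pvLoop2_stop (n : Int) (f : Nat) (s : List Int) (h : ¬ s.sum < n) :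
    pvLoop2 n f s = s := by
  cases f <;> simp [pvLoop2, h]

theorem pvPass2_replicate (n c : Int) (g : Nat) :
    pvPass2 n (List.replicate g c)
    = List.replicate (min g (n - (List.replicate g c).sum).toNat) (c+1)
        ++ List.replicate (g - min g (n - (List.replicate g c).sum).toNat) c := by
  have h := pvPass2_go n c g 0
  simp only [List.replicate_zero, List.nil_append, Nat.zero_add] at h
  simpa [pvPass2, List.range_eq_range'] using h

theorem pvPass1_replicate (n c : Int) (hc : 2 ≤ c) (g : Nat) :
    pvPass1 n (List.replicate g c)
    = List.replicate (g - min g ((List.replicate g c).sum - n).toNat) c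
        ++ List.replicate (min g ((List.replicate g c).sum - n).toNat) (c-1) := by
  have h := pvPass1_go n c hc g g 0 (le_refl g) (Or.inl rfl)
  simp only [List.replicate_zero, List.append_nil, Nat.zero_add] at h
  simpa [pvPass1] using h

theorem pvLoop2_spec (n : Int) (g : Nat) (hg : 1 ≤ g) : ∀ (f : Nat) (c : Int),
    (g : Int) * c ≤ n → (n - (g : Int) * c).toNat ≤ f →
    pvLoop2 n f (List.replicate g c)
    = List.replicate ((n - (g : Int) * c).toNat % g)
        (c + ((n - (g : Int) * c).toNat / g : Nat) + 1)
        ++ List.replicate (g - (n - (g : Int) * c).toNat % g)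
            (c + ((n - (g : Int) * c).toNat / g : Nat)) := by
  intro f
  induction f with
  | zero =>
    intro c hcn hf
    have h0 : (n - (g : Int) * c).toNat = 0 := by omega
    rw [pvLoop2, h0]
    simp
  | succ f ih =>
    intro c hcn hf
    have hsum : (List.replicate g c).sum = (g : Int) * c := pv_sum_replicate g c
    by_cases hlt : (List.replicate g c).sum < n
    · rw [show pvLoop2 n (f+1) (List.replicate g c) = pvLoop2 n f (pvPass2 n (List.replicate g c)) from
        by rw [pvLoop2, if_pos hlt]]
      rw [pvPass2_replicate, hsum]
      rw [hsum] at hlt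
      by_cases hbig : g ≤ (n - (g : Int) * c).toNat
      · have hmin : min g (n - (g : Int) * c).toNat = g := by omega
        rw [hmin]
        simp only [Nat.sub_self, List.replicate_zero, List.append_nil]
        have hc1 : (g : Int) * (c + 1) ≤ n := by
          have : (g : Int) * (c + 1) = (g : Int) * c + g := by ring
          omega
        have hf1 : (n - (g : Int) * c * 1).toNat ≤ f + 1 := by omega
        rw [ih (c+1) hc1 (by
          have : (g : Int) * (c + 1) = (g : Int) * c + g := by ring
          omega)]
        have heq : (n - (g : Int) * (c+1)).toNat = (n - (g : Int) * c).toNat - g := by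
          have : (g : Int) * (c + 1) = (g : Int) * c + g := by ring
          omega
        rw [heq]
        have hmod : ((n - (g : Int) * c).toNat - g) % g = (n - (g : Int) * c).toNat % g := by
          rw [← Nat.mod_eq_sub_mod hbig]
        have hdiv : ((n - (g : Int) * c).toNat - g) / g + 1 = (n - (g : Int) * c).toNat / g := by
          rw [Nat.div_eq_sub_div (by omega) hbig]
        rw [hmod]
        congr 2
        · push_cast [← hdiv]; ring
        · push_cast [← hdiv]; ring
      · -- partial pass: 0 < d < g, the pass ends exactly at sum = n
        have hd : 0 < (n - (g : Int) * c).toNat := by omega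
        have hmin : min g (n - (g : Int) * c).toNat = (n - (g : Int) * c).toNat := by omega
        rw [hmin]
        have hsum2 : (List.replicate (n - (g : Int) * c).toNat (c+1)
            ++ List.replicate (g - (n - (g : Int) * c).toNat) c).sum = n := by
          rw [pv_shapeF_sum]
          push_cast [Nat.cast_sub (by omega : (n - (g : Int) * c).toNat ≤ g)]
          have : ((n - (g : Int) * c).toNat : Int) = n - (g : Int) * c := by omega
          rw [this]
          ring
        rw [pvLoop2_stop _ _ _ (by omega)]
        have hq : (n - (g : Int) * c).toNat / g = 0 := Nat.div_eq_of_lt (by omega)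
        have hr : (n - (g : Int) * c).toNat % g = (n - (g : Int) * c).toNat :=
          Nat.mod_eq_of_lt (by omega)
        rw [hq, hr]
        simp
    · rw [pvLoop2_stop _ _ _ hlt]
      rw [hsum] at hlt
      have h0 : (n - (g : Int) * c).toNat = 0 := by omega
      rw [h0]
      simp

theorem pvLoop1_spec (n : Int) (g : Nat) (hg : 1 ≤ g) (hn : (g : Int) ≤ n) : ∀ (f : Nat) (c : Int),
    1 ≤ c → n ≤ (g : Int) * c → ((g : Int) * c - n).toNat ≤ f →
    pvLoop1 n f (List.replicate g c)
    = List.replicate (g - ((g : Int) * c - n).toNat % g)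
        (c - (((g : Int) * c - n).toNat / g : Nat))
        ++ List.replicate (((g : Int) * c - n).toNat % g)
            (c - (((g : Int) * c - n).toNat / g : Nat) - 1) := by
  intro f
  induction f with
  | zero =>
    intro c hc hcn hf
    have h0 : ((g : Int) * c - n).toNat = 0 := by omega
    rw [pvLoop1, h0]
    simp
  | succ f ih =>
    intro c hc hcn hf
    have hsum : (List.replicate g c).sum = (g : Int) * c := pv_sum_replicate g c
    by_cases hlt : (List.replicate g c).sum > n
    · rw [show pvLoop1 n (f+1) (List.replicate g c) = pvLoop1 n f (pvPass1 n (List.replicate g c)) from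
        by rw [pvLoop1, if_pos hlt]]
      rw [hsum] at hlt
      have hc2 : 2 ≤ c := by
        by_contra h
        have hc1 : c = 1 := by omega
        rw [hc1, mul_one] at hlt
        omega
      rw [pvPass1_replicate n c hc2, hsum]
      by_cases hbig : g ≤ ((g : Int) * c - n).toNat
      · have hmin : min g ((g : Int) * c - n).toNat = g := by omega
        rw [hmin]
        simp only [Nat.sub_self, List.replicate_zero, List.nil_append]
        have hgc : (g : Int) * (c - 1) = (g : Int) * c - g := by ring
        rw [ih (c-1) (by omega) (by omega) (by omega)]
        have heq : ((g : Int) * (c-1) - n).toNat = ((g : Int) * c - n).toNat - g := by omega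
        rw [heq]
        have hmod : (((g : Int) * c - n).toNat - g) % g = ((g : Int) * c - n).toNat % g := by
          rw [← Nat.mod_eq_sub_mod hbig]
        have hdiv : (((g : Int) * c - n).toNat - g) / g + 1 = ((g : Int) * c - n).toNat / g := by
          rw [Nat.div_eq_sub_div (by omega) hbig]
        rw [hmod]
        congr 2
        · push_cast [← hdiv]; ring
        · push_cast [← hdiv]; ring
      · have hd : 0 < ((g : Int) * c - n).toNat := by omega
        have hmin : min g ((g : Int) * c - n).toNat = ((g : Int) * c - n).toNat := by omega
        rw [hmin]
        have hsum2 : (List.replicate (g - ((g : Int) * c - n).toNat) c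
            ++ List.replicate ((g : Int) * c - n).toNat (c-1)).sum = n := by
          rw [pv_shapeB_sum]
          push_cast [Nat.cast_sub (by omega : ((g : Int) * c - n).toNat ≤ g)]
          have : (((g : Int) * c - n).toNat : Int) = (g : Int) * c - n := by omega
          rw [this]
          ring
        rw [pvLoop1_stop _ _ _ (by omega)]
        have hq : ((g : Int) * c - n).toNat / g = 0 := Nat.div_eq_of_lt (by omega)
        have hr : ((g : Int) * c - n).toNat % g = ((g : Int) * c - n).toNat :=
          Nat.mod_eq_of_lt (by omega)
        rw [hq, hr]
        simp
    · rw [pvLoop1_stop _ _ _ hlt]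
      rw [hsum] at hlt
      have h0 : ((g : Int) * c - n).toNat = 0 := by omega
      rw [h0]
      simp

-- a range-comprehension with an index threshold is two replicate blocks
theorem pv_range_map_ite (g r : Nat) (hr : r ≤ g) (a b : Int) :
    (List.range g).map (fun (k : Nat) => if (k : Int) < (r : Int) then a else b)
    = List.replicate r a ++ List.replicate (g - r) b := by
  apply List.ext_getElem
  · simp; omega
  · intro i h1 h2
    have hi : i < g := by simpa using h1
    rw [List.getElem_map, List.getElem_range, List.getElem_append]
    simp only [List.getElem_replicate, List.length_replicate]
    split_ifs <;> first | rfl | (exfalso; omega)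

theorem balanced_partition_sizes_main (n ng p : Int)
    (hPre : Pre_balanced_partition_sizes n ng p) :
    balanced_partition_sizes n ng p = balanced_partition_sizes_alt n ng p := by
  have hGpos : (0 : Int) < max ng 1 := by omega
  have hG : (max ng 1 : Int) = (((max ng 1).toNat : Int)) := by omega
  have hg1 : 1 ≤ (max ng 1).toNat := by omega
  have hinit : (PySem.List.pyRange 0 (max ng 1) 1).map (fun _ => p)
      = List.replicate (max ng 1).toNat p := by
    rw [PySem.List.pyRange_one]
    simp [Function.comp_def]
  simp only [balanced_partition_sizes, balanced_partition_sizes_alt, hinit]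
  rw [pv_sum_replicate]
  by_cases hle : p * max ng 1 ≤ n
  · -- surplus / exact: the first loop does not run, the second distributes n - total
    have hle' : ((max ng 1).toNat : Int) * p ≤ n := by
      rw [mul_comm p] at hle; rwa [hG] at hle
    have hfuel0 : (((max ng 1).toNat : Int) * p - n).toNat = 0 := by omega
    rw [hfuel0]
    rw [show pvLoop1 n 0 (List.replicate (max ng 1).toNat p)
          = List.replicate (max ng 1).toNat p from rfl]
    rw [pv_sum_replicate]
    rw [pvLoop2_spec n (max ng 1).toNat hg1 _ p hle' (le_refl _)]
    rw [if_pos hle]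
    have hnum : n - p * max ng 1 = ((n - ((max ng 1).toNat : Int) * p).toNat : Int) := by
      rw [mul_comm p, hG]; simp only [Int.toNat_natCast]; omega
    rw [hnum, hG]
    simp only [Int.toNat_natCast, PySem.Int.floordiv_natCast, PySem.Int.mod_natCast]
    rw [PySem.List.pyRange_one]
    have hzero : ((((max ng 1).toNat : Int)) - 0).toNat = (max ng 1).toNat := by omega
    rw [hzero, List.map_map]
    have hfun : ((fun i => p + ((((n - ((max ng 1).toNat : Int) * p).toNat / (max ng 1).toNat : Nat) : Int)) + if i < ((((n - ((max ng 1).toNat : Int) * p).toNat % (max ng 1).toNat : Nat) : Int)) then 1 else 0) ∘ fun (k : Nat) => (0 : Int) + ↑k)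
        = fun (k : Nat) => if (k : Int) < ((((n - ((max ng 1).toNat : Int) * p).toNat % (max ng 1).toNat : Nat) : Int)) then (p + ((((n - ((max ng 1).toNat : Int) * p).toNat / (max ng 1).toNat : Nat) : Int)) + 1) else (p + ((((n - ((max ng 1).toNat : Int) * p).toNat / (max ng 1).toNat : Nat) : Int))) := by
      funext k
      simp only [Function.comp_apply, zero_add]
      split_ifs <;> ring
    rw [hfun, pv_range_map_ite _ _ (le_of_lt (Nat.mod_lt _ (by omega)))]
  · -- deficit: only the first loop runs, taking the remainder off the back
    obtain hp2 : 2 ≤ p ∧ (max ng 1 : Int) ≤ n := by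
      rcases hPre with h | h
      · exact absurd h hle
      · exact h
    obtain ⟨hp2, hgn⟩ := hp2
    have hgn' : (((max ng 1).toNat : Int)) ≤ n := by omega
    have hnle : n ≤ (((max ng 1).toNat : Int)) * p := by
      rw [mul_comm p, hG] at hle; omega
    rw [pvLoop1_spec n (max ng 1).toNat hg1 hgn' _ p (by omega) hnle (le_refl _)]
    -- the list after the first loop sums to exactly n, so the second loop is the identity
    have hrle : ((((max ng 1).toNat : Int)) * p - n).toNat % (max ng 1).toNat ≤ (max ng 1).toNat :=
      le_of_lt (Nat.mod_lt _ (by omega))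
    have hqr : ((max ng 1).toNat : Int) * ((((((max ng 1).toNat : Int)) * p - n).toNat / (max ng 1).toNat : Nat) : Int) + (((((max ng 1).toNat : Int)) * p - n).toNat % (max ng 1).toNat : Nat) = ((((((max ng 1).toNat : Int)) * p - n).toNat : Nat) : Int) := by
      exact_mod_cast congrArg (Nat.cast : Nat → Int) (Nat.div_add_mod ((((max ng 1).toNat : Int)) * p - n).toNat (max ng 1).toNat)
    have hDN : ((((((max ng 1).toNat : Int)) * p - n).toNat : Nat) : Int) = (((max ng 1).toNat : Int)) * p - n := by omega
    have hsumL : (List.replicate ((max ng 1).toNat - ((((max ng 1).toNat : Int)) * p - n).toNat % (max ng 1).toNat) (p - (((((max ng 1).toNat : Int)) * p - n).toNat / (max ng 1).toNat : Nat))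
        ++ List.replicate (((((max ng 1).toNat : Int)) * p - n).toNat % (max ng 1).toNat) (p - (((((max ng 1).toNat : Int)) * p - n).toNat / (max ng 1).toNat : Nat) - 1)).sum = n := by
      rw [pv_shapeB_sum, Nat.cast_sub hrle]
      linear_combination -hqr - hDN
    rw [hsumL]
    rw [show (n - n).toNat = 0 from by omega]
    rw [show ∀ s, pvLoop2 n 0 s = s from fun s => rfl]
    rw [if_neg hle]
    have hnum : p * max ng 1 - n = ((((((max ng 1).toNat : Int)) * p - n).toNat : Nat) : Int) := by
      rw [mul_comm p, hG]; simp only [Int.toNat_natCast]; omega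
    rw [hnum, hG]
    simp only [Int.toNat_natCast, PySem.Int.floordiv_natCast, PySem.Int.mod_natCast]
    rw [PySem.List.pyRange_one]
    have hzero : ((((max ng 1).toNat : Int)) - 0).toNat = (max ng 1).toNat := by omega
    rw [hzero, List.map_map]
    have hfun : ((fun i => p - ((((((max ng 1).toNat : Int)) * p - n).toNat / (max ng 1).toNat : Nat) : Int) - if ((((max ng 1).toNat : Int)) - ((((((max ng 1).toNat : Int)) * p - n).toNat % (max ng 1).toNat : Nat) : Int)) ≤ i then 1 else 0) ∘ fun (k : Nat) => (0 : Int) + ↑k)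
        = fun (k : Nat) => if (k : Int) < ((((max ng 1).toNat - ((((max ng 1).toNat : Int)) * p - n).toNat % (max ng 1).toNat : Nat) : Int)) then (p - ((((((max ng 1).toNat : Int)) * p - n).toNat / (max ng 1).toNat : Nat) : Int)) else (p - ((((((max ng 1).toNat : Int)) * p - n).toNat / (max ng 1).toNat : Nat) : Int) - 1) := by
      funext k
      simp only [Function.comp_apply, zero_add]
      rw [show ((((max ng 1).toNat : Int)) - ((((((max ng 1).toNat : Int)) * p - n).toNat % (max ng 1).toNat : Nat) : Int)) = (((max ng 1).toNat - ((((max ng 1).toNat : Int)) * p - n).toNat % (max ng 1).toNat : Nat) : Int) from by push_cast [Nat.cast_sub hrle]; ring]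
      by_cases hk : (k : Int) < (((max ng 1).toNat - ((((max ng 1).toNat : Int)) * p - n).toNat % (max ng 1).toNat : Nat) : Int)
      · rw [if_neg (not_le.mpr hk), if_pos hk]
        ring
      · rw [if_pos (not_lt.mp hk), if_neg hk]
    rw [hfun, pv_range_map_ite _ _ (by omega)]
    congr 1
    rw [show (max ng 1).toNat - ((max ng 1).toNat - ((((max ng 1).toNat : Int)) * p - n).toNat % (max ng 1).toNat) = ((((max ng 1).toNat : Int)) * p - n).toNat % (max ng 1).toNat from by omega]

-- ===== VERDICT (by name: the statement is the Claim_ definition above) =====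
theorem balanced_partition_sizes_spec : Claim_equal_balanced_partition_sizes := by
  intro n ng p _ hPre
  unfold Spec_balanced_partition_sizes
  exact balanced_partition_sizes_main n ng p hPre
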